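-- pv_equiv track=rewrite | github.com/lekhit/vllm | vllm/segkv/utils.py | compute_segment_boundaries
-- ===== SOURCE A (Python) =====
-- from typing import List, Tuple, Optional, Sequence
--
-- def compute_segment_boundaries(
--     total_tokens: int,
--     segment_size: int,
-- ) -> List[Tuple[int, int]]:
--     assert segment_size > 0
--     assert total_tokens >= 0
--     boundaries = []
--     start = 0
--     while start < total_tokens:
--         end = min(start + segment_size, total_tokens)
--         boundaries.append((start, end))
--         start = end
--     return boundaries
-- ===== SOURCE B (Python) =====
-- def compute_segment_boundaries(
--     total_tokens: int,
--     segment_size: int,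
-- ):
--     assert segment_size > 0
--     assert total_tokens >= 0
--     n = (total_tokens + segment_size - 1) // segment_size
--     return [(i * segment_size, min((i + 1) * segment_size, total_tokens))
--             for i in range(n)]
-- ===== Notes on version B (the rewrite author's own statement) =====
-- stated objective: alternative
-- what changed: Replaces the state-threaded start=end while loop with closed-form index arithmetic: the segment count is computed up front by ceiling division and each boundary pair is derived independently from its index.
import Mathlib
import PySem

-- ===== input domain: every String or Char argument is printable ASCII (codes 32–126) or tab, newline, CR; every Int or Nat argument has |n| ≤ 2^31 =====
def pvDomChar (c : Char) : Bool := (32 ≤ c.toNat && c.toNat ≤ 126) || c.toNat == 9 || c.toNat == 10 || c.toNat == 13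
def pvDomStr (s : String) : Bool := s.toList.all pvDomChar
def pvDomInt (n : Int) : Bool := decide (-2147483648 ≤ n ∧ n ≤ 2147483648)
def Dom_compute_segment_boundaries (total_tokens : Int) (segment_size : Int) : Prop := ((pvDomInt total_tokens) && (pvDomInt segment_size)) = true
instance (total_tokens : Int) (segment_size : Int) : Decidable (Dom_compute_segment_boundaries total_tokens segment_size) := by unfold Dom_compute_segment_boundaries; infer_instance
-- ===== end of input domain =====

-- B replaces A's state-threaded while loop (start = end) with closed-form index
-- arithmetic: segment count by ceiling division, each pair computed from its index.

-- ===== PORT A =====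
-- A's while loop; fuel bounds the iteration count (guard for totality only — the
-- loop runs at most total_tokens steps when segment_size > 0, which Pre_ ensures).
def csbLoop (total seg : Int) : Nat → Int → List (Int × Int)
  | 0, _ => []
  | fuel + 1, start =>
    if start < total then
      let e := min (start + seg) total
      (start, e) :: csbLoop total seg fuel e
    else []

def compute_segment_boundaries (total_tokens : Int) (segment_size : Int) : List (Int × Int) :=
  csbLoop total_tokens segment_size (total_tokens.toNat + 1) 0

-- ===== PORT B =====
def compute_segment_boundaries_alt (total_tokens : Int) (segment_size : Int) : List (Int × Int) :=
  let n := PySem.Int.floordiv (total_tokens + segment_size - 1) segment_size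
  (PySem.List.pyRange 0 n 1).map
    (fun i => (i * segment_size, min ((i + 1) * segment_size) total_tokens))

-- ===== PRECONDITION & SPEC =====
-- Pre_: exactly the inputs where A's two asserts hold (otherwise A raises AssertionError).
def Pre_compute_segment_boundaries (total_tokens : Int) (segment_size : Int) : Prop :=
  segment_size > 0 ∧ total_tokens ≥ 0
instance (total_tokens : Int) (segment_size : Int) : Decidable (Pre_compute_segment_boundaries total_tokens segment_size) := by unfold Pre_compute_segment_boundaries; infer_instance

def pvWitness_compute_segment_boundaries : Int × Int := (10, 4)

def Spec_compute_segment_boundaries (total_tokens : Int) (segment_size : Int) (out : List (Int × Int)) : Prop := out = compute_segment_boundaries_alt total_tokens segment_size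
instance (total_tokens : Int) (segment_size : Int) (out : List (Int × Int)) : Decidable (Spec_compute_segment_boundaries total_tokens segment_size out) := by unfold Spec_compute_segment_boundaries; infer_instance

-- ===== CLAIM (what is proved, stated in full; the proofs are below) =====
def Claim_equal_compute_segment_boundaries : Prop := ∀ (total_tokens : Int) (segment_size : Int), Dom_compute_segment_boundaries total_tokens segment_size → Pre_compute_segment_boundaries total_tokens segment_size → Spec_compute_segment_boundaries total_tokens segment_size (compute_segment_boundaries total_tokens segment_size)

-- ===== LEMMAS AND PROOFS =====

-- With ceiling count n, the loop started at i*seg produces exactly the mapped range [i, n).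
theorem csbLoop_eq (total seg : Int) (hseg : 0 < seg)
    (n : Int) (hn : n = PySem.Int.floordiv (total + seg - 1) seg) :
    ∀ (fuel : Nat) (i : Int), 0 ≤ i → n ≤ i + fuel →
      csbLoop total seg fuel (i * seg) =
        (PySem.List.pyRange i n 1).map
          (fun j => (j * seg, min ((j + 1) * seg) total)) := by
  -- n is the ceiling of total/seg: characterize it
  have hnchar : (n - 1) * seg < total ∧ total ≤ n * seg := by
    have h := (PySem.Int.floordiv_eq_iff_of_pos hseg).mp hn.symm
    constructor <;> nlinarith [h.1, h.2]
  intro fuel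
  induction fuel with
  | zero =>
    intro i hi hni
    by_cases h : i * seg < total
    · exfalso
      have : i < n := by nlinarith [hnchar.1, hnchar.2]
      omega
    · rw [PySem.List.pyRange_one_eq_nil (by nlinarith [hnchar.2])]
      simp [csbLoop]
  | succ fuel ih =>
    intro i hi hni
    by_cases h : i * seg < total
    · have hin : i < n := by nlinarith [hnchar.1, hnchar.2]
      rw [PySem.List.pyRange_one_cons hin]
      simp only [csbLoop, if_pos h, List.map_cons]
      by_cases h2 : (i + 1) * seg ≤ total
      · have hm : min (i * seg + seg) total = (i + 1) * seg := by
          rw [min_eq_left (by linarith)]; ring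
        rw [hm, ih (i + 1) (by omega) (by omega), min_eq_left h2]
      · -- clamped final segment: next start is total and i+1 = n
        have hin1 : n ≤ i + 1 := by nlinarith [hnchar.1]
        have hm : min (i * seg + seg) total = total := by
          rw [min_eq_right (by linarith)]
        have hm2 : min ((i + 1) * seg) total = total := min_eq_right (by linarith)
        rw [hm, hm2, PySem.List.pyRange_one_eq_nil (by omega)]
        rcases fuel with _ | fuel <;> simp [csbLoop]
    · have hni' : n ≤ i := by by_contra hc; push Not at hc; nlinarith [hnchar.1]
      rw [PySem.List.pyRange_one_eq_nil hni']
      simp [csbLoop, h]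

-- ===== VERDICT (by name: the statement is the Claim_ definition above) =====
theorem compute_segment_boundaries_spec : Claim_equal_compute_segment_boundaries := by
  intro total seg _hd hpre
  rcases hpre with ⟨hseg, htot⟩
  unfold Spec_compute_segment_boundaries compute_segment_boundaries compute_segment_boundaries_alt
  have hn : PySem.Int.floordiv (total + seg - 1) seg ≤ total := by
    have h := (PySem.Int.floordiv_eq_iff_of_pos (q := PySem.Int.floordiv (total + seg - 1) seg) hseg).mp rfl
    nlinarith [h.1, h.2]
  have := csbLoop_eq total seg hseg _ rfl (total.toNat + 1) 0 le_rfl (by push_cast; omega)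
  simpa using this
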